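-- pv_equiv track=rewrite | github.com/ADScanPro/adscan | adscan_internal/cli/nmap.py | _build_ip_to_hostnames_map
-- ===== SOURCE A (Python) =====
-- def _build_ip_to_hostnames_map(
--     hostnames: list[str],
--     host_to_ips: dict[str, list[str]],
-- ) -> dict[str, list[str]]:
--     """Return a stable IP -> hostnames mapping from massdns results."""
--     ip_to_hostnames: dict[str, list[str]] = {}
--     for hostname in hostnames:
--         key = str(hostname or "").strip().rstrip(".").lower()
--         if not key:
--             continue
--         for ip_value in host_to_ips.get(key, []):
--             if not ip_value:
--                 continue
--             existing = ip_to_hostnames.setdefault(ip_value, [])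
--             if hostname not in existing:
--                 existing.append(hostname)
--     return ip_to_hostnames
-- ===== SOURCE B (Python) =====
-- def _build_ip_to_hostnames_map(
--     hostnames: list[str],
--     host_to_ips: dict[str, list[str]],
-- ) -> dict[str, list[str]]:
--     """Flatten-then-group rewrite: build a flat (ip, hostname) event list,
--     then group it -- distinct IPs in first-event order, each mapped to the
--     ordered dedup of the hostnames of its own events.  No dict accumulation
--     during the scan."""
--     events = [
--         (ip, hostname)
--         for hostname in hostnames
--         for key in [str(hostname or "").strip().rstrip(".").lower()]
--         if key
--         for ip in host_to_ips.get(key, [])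
--         if ip
--     ]
--     ips = list(dict.fromkeys(ip for ip, _ in events))
--     return {ip: list(dict.fromkeys(h for i, h in events if i == ip)) for ip in ips}
-- ===== Notes on version B (the rewrite author's own statement) =====
-- stated objective: alternative
-- what changed: A accumulates a dict of lists while scanning, with an inline membership check before each append; B never accumulates a dict during the scan: it flattens the input into a plain (ip, hostname) event list, then groups it afterwards -- distinct IPs in first-event order, each IP's list recomputed by filtering the event list and order-deduplicating.
import Mathlib
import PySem

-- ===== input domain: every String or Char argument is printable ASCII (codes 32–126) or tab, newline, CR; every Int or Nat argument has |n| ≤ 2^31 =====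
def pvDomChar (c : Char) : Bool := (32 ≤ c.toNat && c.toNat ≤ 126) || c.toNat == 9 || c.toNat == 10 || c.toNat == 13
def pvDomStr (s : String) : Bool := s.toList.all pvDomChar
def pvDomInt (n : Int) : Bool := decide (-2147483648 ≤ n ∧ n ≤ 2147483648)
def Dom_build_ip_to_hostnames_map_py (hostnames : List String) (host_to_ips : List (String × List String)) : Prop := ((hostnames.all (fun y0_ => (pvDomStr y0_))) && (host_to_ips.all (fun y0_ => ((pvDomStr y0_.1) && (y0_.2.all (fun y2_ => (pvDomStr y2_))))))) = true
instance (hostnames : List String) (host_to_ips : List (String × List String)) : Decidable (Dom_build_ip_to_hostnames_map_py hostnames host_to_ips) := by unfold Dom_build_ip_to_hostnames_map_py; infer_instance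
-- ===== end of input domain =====

-- B replaces A's scan-with-dict-accumulation by a flatten-then-group structure:
-- a flat (ip, hostname) event list built first, then grouped per distinct IP
-- (alternative decomposition; same results).

-- shared key normalization: str(hostname or "").strip().rstrip(".").lower()
-- (rstrip(".") ported by hand as reverse/dropWhile '.'/reverse — exact for any string)
def pvKey (hostname : String) : String :=
  PySem.Str.lower (String.ofList (((PySem.Str.strip hostname).toList.reverse.dropWhile (· == '.')).reverse))

-- ===== PORT A =====
def build_ip_to_hostnames_map_py (hostnames : List String) (host_to_ips : List (String × List String)) : List (String × List String) :=
  (hostnames.foldl (fun acc hostname =>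
      let key := pvKey hostname
      if key = "" then acc
      else ((PySem.Dict.mk host_to_ips).getD key []).foldl (fun acc2 ip_value =>
        if ip_value = "" then acc2
        else
          let d := acc2.setdefault ip_value ([] : List String)
          let existing := (d.get? ip_value).getD []
          if hostname ∈ existing then d
          else d.insert ip_value (existing ++ [hostname])) acc)
    PySem.Dict.empty).items

-- ===== PORT B =====
-- the event-list comprehension of Source B
def pvEvents (hostnames : List String) (host_to_ips : List (String × List String)) : List (String × String) :=
  hostnames.flatMap (fun hostname =>
    let key := pvKey hostname
    if key = "" then []
    else ((PySem.Dict.mk host_to_ips).getD key []).filterMap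
      (fun ip => if ip = "" then none else some (ip, hostname)))

def build_ip_to_hostnames_map_py_alt (hostnames : List String) (host_to_ips : List (String × List String)) : List (String × List String) :=
  let events := pvEvents hostnames host_to_ips
  let ips := PySem.List.dedup (events.map Prod.fst)
  ips.map (fun ip => (ip, PySem.List.dedup ((events.filter (fun e => e.1 == ip)).map Prod.snd)))

-- ===== PRECONDITION & SPEC =====
def Spec_build_ip_to_hostnames_map_py (hostnames : List String) (host_to_ips : List (String × List String)) (out : List (String × List String)) : Prop := out = build_ip_to_hostnames_map_py_alt hostnames host_to_ips
instance (hostnames : List String) (host_to_ips : List (String × List String)) (out : List (String × List String)) : Decidable (Spec_build_ip_to_hostnames_map_py hostnames host_to_ips out) := by unfold Spec_build_ip_to_hostnames_map_py; infer_instance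

-- ===== CLAIM (what is proved, stated in full; the proofs are below) =====
def Claim_equal_build_ip_to_hostnames_map_py : Prop := ∀ (hostnames : List String) (host_to_ips : List (String × List String)), Dom_build_ip_to_hostnames_map_py hostnames host_to_ips → Spec_build_ip_to_hostnames_map_py hostnames host_to_ips (build_ip_to_hostnames_map_py hostnames host_to_ips)

-- ===== LEMMAS AND PROOFS =====

-- A's loop body, per flattened (ip, hostname) event
def pvStepA (acc2 : PySem.Dict String (List String)) (e : String × String) : PySem.Dict String (List String) :=
  let d := acc2.setdefault e.1 ([] : List String)
  let existing := (d.get? e.1).getD []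
  if e.2 ∈ existing then d
  else d.insert e.1 (existing ++ [e.2])

-- the grouping B computes for a given event list
def pvGVal (es : List (String × String)) (ip : String) : List String :=
  PySem.List.dedup ((es.filter (fun e => e.1 == ip)).map Prod.snd)

def pvGSpec (es : List (String × String)) : List (String × List String) :=
  (PySem.List.dedup (es.map Prod.fst)).map (fun ip => (ip, pvGVal es ip))

theorem pv_dedup_append_singleton {α : Type} [DecidableEq α] (v : List α) (h : α) :
    PySem.List.dedup (v ++ [h]) =
      if h ∈ v then PySem.List.dedup v else PySem.List.dedup v ++ [h] := by
  have : PySem.List.dedup (v ++ [h]) = (PySem.Set.ofList v).add h := by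
    simp [PySem.List.dedup, PySem.Set.ofList, List.foldl_append]
  rw [this, PySem.Set.add]
  by_cases hm : h ∈ v
  · simp only [if_pos hm]
    simp [PySem.List.dedup, (PySem.Set.mem_ofList v h).2 hm]
  · have hns : h ∉ PySem.Set.ofList v := fun hc => hm ((PySem.Set.mem_ofList v h).1 hc)
    simp only [if_neg hm]
    simp [PySem.List.dedup, hns]

-- lookup in a dict whose items are (i, f i) over a list of keys
theorem pv_get?_mk_map (ips : List String) (f : String → List String) (k : String) :
    (PySem.Dict.mk (ips.map (fun i => (i, f i)))).get? k =
      if k ∈ ips then some (f k) else none := by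
  induction ips with
  | nil => simp [PySem.Dict.get?]
  | cons i rest ih =>
      rw [List.map_cons, PySem.Dict.get?_mk_cons]
      by_cases hk : i = k
      · subst hk; simp
      · have : (i == k) = false := by simpa using hk
        simp [this, ih, Ne.symm hk]

theorem pv_contains_mk_map (ips : List String) (f : String → List String) (k : String) :
    (PySem.Dict.mk (ips.map (fun i => (i, f i)))).contains k = decide (k ∈ ips) := by
  rw [PySem.Dict.contains_eq_isSome_get?, pv_get?_mk_map]
  by_cases hk : k ∈ ips <;> simp [hk]

-- one event: A's step on the grouped state is the grouped state of es0 ++ [e]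
theorem pv_step_gspec (es0 : List (String × String)) (e : String × String) :
    pvStepA (PySem.Dict.mk (pvGSpec es0)) e = PySem.Dict.mk (pvGSpec (es0 ++ [e])) := by
  obtain ⟨ip, h⟩ := e
  have hkeys : PySem.List.dedup ((es0 ++ [(ip, h)]).map Prod.fst)
      = if ip ∈ es0.map Prod.fst then PySem.List.dedup (es0.map Prod.fst)
        else PySem.List.dedup (es0.map Prod.fst) ++ [ip] := by
    rw [List.map_append]; exact pv_dedup_append_singleton _ ip
  have hval : ∀ ip', pvGVal (es0 ++ [(ip, h)]) ip' =
      if ip' = ip then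
        (if h ∈ (es0.filter (fun e => e.1 == ip)).map Prod.snd then pvGVal es0 ip
         else pvGVal es0 ip ++ [h])
      else pvGVal es0 ip' := by
    intro ip'
    unfold pvGVal
    rw [List.filter_append]
    by_cases hip : ip' = ip
    · rw [if_pos hip, hip]
      simp only [List.filter_cons, List.filter_nil, beq_self_eq_true, if_true]
      rw [List.map_append]
      simpa using pv_dedup_append_singleton ((es0.filter (fun e => e.1 == ip)).map Prod.snd) h
    · have : (((ip, h)).1 == ip') = false := by simpa using fun hh => hip hh.symm
      simp [this, hip]
  unfold pvStepA pvGSpec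
  simp only
  by_cases hmem : ip ∈ es0.map Prod.fst
  · -- key already present
    have hmemd : ip ∈ PySem.List.dedup (es0.map Prod.fst) := by
      simpa [PySem.List.mem_dedup] using hmem
    have hcont : (PySem.Dict.mk ((PySem.List.dedup (es0.map Prod.fst)).map (fun i => (i, pvGVal es0 i)))).contains ip = true := by
      rw [pv_contains_mk_map]; simpa using hmemd
    rw [PySem.Dict.setdefault_of_contains _ _ hcont, pv_get?_mk_map]
    rw [if_pos hmemd]
    simp only [Option.getD_some]
    by_cases hh : h ∈ pvGVal es0 ip
    · rw [if_pos hh]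
      have hh' : h ∈ (es0.filter (fun e => e.1 == ip)).map Prod.snd := by
        simpa [pvGVal, PySem.List.mem_dedup] using hh
      apply PySem.Dict.ext
      rw [hkeys, if_pos hmem]
      apply List.map_congr_left
      intro i _
      rw [hval i]
      by_cases hi : i = ip
      · subst hi; rw [if_pos rfl, if_pos hh']
      · rw [if_neg hi]
    · rw [if_neg hh]
      have hh' : h ∉ (es0.filter (fun e => e.1 == ip)).map Prod.snd := by
        simpa [pvGVal, PySem.List.mem_dedup] using hh
      apply PySem.Dict.ext
      rw [PySem.Dict.items_insert_of_contains _ _ hcont]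
      rw [hkeys, if_pos hmem, List.map_map]
      apply List.map_congr_left
      intro i _
      rw [hval i]
      by_cases hi : i = ip
      · subst hi
        simp only [Function.comp_apply, beq_self_eq_true, if_true, if_neg hh']
      · have hbe : (i == ip) = false := by simpa using hi
        simp [Function.comp, hbe, hi]
  · -- new key: appended at the end with value [h]
    have hmemd : ip ∉ PySem.List.dedup (es0.map Prod.fst) := by
      simpa [PySem.List.mem_dedup] using hmem
    have hcont : (PySem.Dict.mk ((PySem.List.dedup (es0.map Prod.fst)).map (fun i => (i, pvGVal es0 i)))).contains ip = false := by
      rw [pv_contains_mk_map]; simpa using hmemd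
    rw [PySem.Dict.setdefault_of_not_contains _ _ hcont]
    rw [PySem.Dict.get?_insert_self]
    simp only [Option.getD_some, List.not_mem_nil, if_false, List.nil_append]
    rw [PySem.Dict.insert_insert_self]
    apply PySem.Dict.ext
    have hcont2 : (PySem.Dict.mk ((PySem.List.dedup (es0.map Prod.fst)).map (fun i => (i, pvGVal es0 i)))).contains ip = false := hcont
    rw [PySem.Dict.items_insert_of_not_contains _ _ hcont2]
    rw [hkeys, if_neg hmem, List.map_append]
    congr 1
    · apply List.map_congr_left
      intro i hi
      have hine : i ≠ ip := fun hh => hmemd (hh ▸ hi)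
      rw [hval i, if_neg hine]
    · simp only [List.map_cons, List.map_nil]
      rw [hval ip, if_pos rfl]
      have hfil : es0.filter (fun e => e.1 == ip) = [] := by
        apply List.filter_eq_nil_iff.2
        intro e he hbe
        exact hmem (List.mem_map.2 ⟨e, he, by simpa using hbe⟩)
      simp [pvGVal, hfil, PySem.List.dedup, PySem.Set.ofList, PySem.Set.empty]

-- the fold of A's step extends the grouped state along the event list
theorem pv_foldl_gspec (es es0 : List (String × String)) :
    es.foldl pvStepA (PySem.Dict.mk (pvGSpec es0)) = PySem.Dict.mk (pvGSpec (es0 ++ es)) := by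
  induction es generalizing es0 with
  | nil => simp
  | cons e rest ih =>
      rw [List.foldl_cons, pv_step_gspec es0 e, ih (es0 ++ [e])]
      simp

-- A's guarded inner loop over raw ips = fold of pvStepA over the filtered events
theorem pv_inner_filterMap (ips : List String) (hostname : String)
    (d : PySem.Dict String (List String)) :
    ips.foldl (fun acc2 ip_value =>
        if ip_value = "" then acc2
        else
          let dd := acc2.setdefault ip_value ([] : List String)
          let existing := (dd.get? ip_value).getD []
          if hostname ∈ existing then dd
          else dd.insert ip_value (existing ++ [hostname])) d
      = (ips.filterMap (fun ip => if ip = "" then none else some (ip, hostname))).foldl pvStepA d := by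
  induction ips generalizing d with
  | nil => rfl
  | cons ip rest ih =>
      by_cases hip : ip = ""
      · simp only [List.foldl_cons, List.filterMap_cons, if_pos hip]
        exact ih d
      · simp only [List.foldl_cons, List.filterMap_cons, if_neg hip]
        rw [ih]
        rfl

-- A's whole nested loop = fold of pvStepA over the flattened event list
theorem pv_outer_events (hostnames : List String) (host_to_ips : List (String × List String))
    (d : PySem.Dict String (List String)) :
    hostnames.foldl (fun acc hostname =>
        let key := pvKey hostname
        if key = "" then acc
        else ((PySem.Dict.mk host_to_ips).getD key []).foldl (fun acc2 ip_value =>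
          if ip_value = "" then acc2
          else
            let dd := acc2.setdefault ip_value ([] : List String)
            let existing := (dd.get? ip_value).getD []
            if hostname ∈ existing then dd
            else dd.insert ip_value (existing ++ [hostname])) acc) d
      = (pvEvents hostnames host_to_ips).foldl pvStepA d := by
  induction hostnames generalizing d with
  | nil => rfl
  | cons hostname rest ih =>
      simp only [List.foldl_cons, pvEvents, List.flatMap_cons, List.foldl_append]
      by_cases hkey : pvKey hostname = ""
      · simp only [if_pos hkey, List.foldl_nil]
        exact ih d
      · simp only [if_neg hkey]
        rw [pv_inner_filterMap]
        exact ih _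

-- ===== VERDICT (by name: the statement is the Claim_ definition above) =====
theorem build_ip_to_hostnames_map_py_spec : Claim_equal_build_ip_to_hostnames_map_py := by
  intro hostnames host_to_ips _
  unfold Spec_build_ip_to_hostnames_map_py
  unfold build_ip_to_hostnames_map_py build_ip_to_hostnames_map_py_alt
  rw [pv_outer_events]
  have h0 : (PySem.Dict.empty : PySem.Dict String (List String)) = PySem.Dict.mk (pvGSpec []) := rfl
  rw [h0, pv_foldl_gspec]
  simp only [List.nil_append]
  rfl
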